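-- pv_equiv track=rewrite | github.com/angusbarnes/intercepts | old.py | remove_tail_below_threshold
-- ===== SOURCE A (Python) =====
-- def remove_tail_below_threshold(array, threshold):
--     tail_length = 0
--
--     # Find the length of the tail with values below the threshold
--     for value in reversed(array):
--         if value < threshold:
--             tail_length += 1
--         else:
--             break
--
--     # Remove the tail from the array
--     if tail_length == 0: return array
--
--     array = array[:-tail_length]
--     return array
-- ===== SOURCE B (Python) =====
-- def remove_tail_below_threshold(array, threshold):
--     keep = 0
--     for idx, value in enumerate(array):
--         if not (value < threshold):
--             keep = idx + 1
--     if keep == len(array):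
--         return array
--     return array[:keep]
-- ===== Notes on version B (the rewrite author's own statement) =====
-- stated objective: alternative
-- what changed: Replaces A's reverse scan with early break and negative-index slice by a single forward pass maintaining a running keep-boundary (last index not below threshold), then one prefix slice.
import Mathlib
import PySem

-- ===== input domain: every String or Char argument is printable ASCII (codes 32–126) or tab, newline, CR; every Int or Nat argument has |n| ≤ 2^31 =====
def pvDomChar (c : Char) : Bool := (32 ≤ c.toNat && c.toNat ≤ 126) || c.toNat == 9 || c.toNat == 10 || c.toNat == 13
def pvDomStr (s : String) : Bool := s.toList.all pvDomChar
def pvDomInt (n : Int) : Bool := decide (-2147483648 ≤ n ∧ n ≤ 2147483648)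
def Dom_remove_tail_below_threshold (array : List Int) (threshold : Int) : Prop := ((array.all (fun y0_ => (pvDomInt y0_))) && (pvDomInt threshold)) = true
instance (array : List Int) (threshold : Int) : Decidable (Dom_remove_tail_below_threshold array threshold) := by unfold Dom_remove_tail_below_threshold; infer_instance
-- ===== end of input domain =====

-- B replaces A's reverse scan with early break by a single forward pass tracking the keep-boundary; alternative decomposition, same cost.


-- ===== PORT A =====
-- the 'for value in reversed(array): if value < threshold: tail_length += 1 else: break' loop
def pvTailLen (threshold : Int) : List Int → Nat
  | [] => 0
  | v :: rest => if v < threshold then pvTailLen threshold rest + 1 else 0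

def remove_tail_below_threshold (array : List Int) (threshold : Int) : List Int :=
  let tail_length := pvTailLen threshold array.reverse
  if tail_length = 0 then array
  else PySem.List.slice array none (some (-(tail_length : Int)))

-- ===== PORT B =====
def remove_tail_below_threshold_alt (array : List Int) (threshold : Int) : List Int :=
  let keep := (PySem.List.enumerate array).foldl
    (fun k p => if ¬ (p.2 < threshold) then p.1 + 1 else k) (0 : Int)
  if keep = (array.length : Int) then array
  else PySem.List.slice array none (some keep)

-- ===== PRECONDITION & SPEC =====
def Spec_remove_tail_below_threshold (array : List Int) (threshold : Int) (out : List Int) : Prop := out = remove_tail_below_threshold_alt array threshold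
instance (array : List Int) (threshold : Int) (out : List Int) : Decidable (Spec_remove_tail_below_threshold array threshold out) := by unfold Spec_remove_tail_below_threshold; infer_instance

-- ===== CLAIM (what is proved, stated in full; the proofs are below) =====
def Claim_equal_remove_tail_below_threshold : Prop := ∀ (array : List Int) (threshold : Int), Dom_remove_tail_below_threshold array threshold → Spec_remove_tail_below_threshold array threshold (remove_tail_below_threshold array threshold)

-- ===== LEMMAS AND PROOFS =====

theorem pvTailLen_le (threshold : Int) (l : List Int) : pvTailLen threshold l ≤ l.length := by
  induction l with
  | nil => simp [pvTailLen]
  | cons v rest ih =>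
    simp only [pvTailLen, List.length_cons]
    split <;> omega

theorem keep_eq (threshold : Int) (xs : List Int) :
    (PySem.List.enumerate xs).foldl
      (fun k p => if ¬ (p.2 < threshold) then p.1 + 1 else k) (0 : Int)
      = ((xs.length - pvTailLen threshold xs.reverse : Nat) : Int) := by
  induction xs using List.reverseRecOn with
  | nil => simp [PySem.List.enumerate]
  | append_singleton ys v ih =>
    have hle := pvTailLen_le threshold ys.reverse
    rw [PySem.List.enumerate_append, List.foldl_append, ih]
    simp only [PySem.List.enumerate, List.foldl_cons, List.foldl_nil,
      List.reverse_append, List.reverse_singleton, List.singleton_append, pvTailLen,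
      List.length_append, List.length_singleton]
    by_cases h : v < threshold
    · simp [h]
    · simp [h]

-- ===== VERDICT (by name: the statement is the Claim_ definition above) =====
theorem remove_tail_below_threshold_spec : Claim_equal_remove_tail_below_threshold := by
  intro array threshold _
  unfold Spec_remove_tail_below_threshold remove_tail_below_threshold remove_tail_below_threshold_alt
  rw [keep_eq]
  have hle := pvTailLen_le threshold array.reverse
  rw [List.length_reverse] at hle
  set c := pvTailLen threshold array.reverse with hc
  by_cases h0 : c = 0
  · simp [h0]
  · have hlen : array.length - c ≠ array.length := by omega
    have hcast : ((array.length - c : Nat) : Int) ≠ (array.length : Int) := by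
      omega
    rw [if_neg h0, if_neg hcast]
    rw [PySem.List.slice_to_natCast]
    rw [PySem.List.slice_to_neg_natCast array c (by omega)]
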